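-- pv_equiv track=rewrite | github.com/tonight654321/SentimentCoT | laptop/code/run.py | shuffle_sentence
-- ===== SOURCE A (Python) =====
-- def shuffle_sentence(sentence_text):
--     words = sentence_text.split()
--     shuffled_words = []
--     for i in range(0, len(words), 2):
--         if i + 1 < len(words):
--             shuffled_words.extend([words[i+1], words[i]])
--         else:
--             shuffled_words.append(words[i])
--     shuffled_sentence = ' '.join(shuffled_words)
--     return shuffled_sentence
-- ===== SOURCE B (Python) =====
-- def shuffle_sentence(sentence_text):
--     words = sentence_text.split()
--     evens = words[0::2]
--     odds = words[1::2]
--     out = [w for pair in zip(odds, evens) for w in pair]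
--     if len(odds) < len(evens):
--         out.append(evens[-1])
--     return ' '.join(out)
-- ===== Notes on version B (the rewrite author's own statement) =====
-- stated objective: idiomatic
-- what changed: Replaces the index loop with step 2 and its i+1 bounds branch by two strided slices (words[0::2], words[1::2]) interleaved via zip, with the single unmatched trailing word appended when the even slice is longer.
import Mathlib
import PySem

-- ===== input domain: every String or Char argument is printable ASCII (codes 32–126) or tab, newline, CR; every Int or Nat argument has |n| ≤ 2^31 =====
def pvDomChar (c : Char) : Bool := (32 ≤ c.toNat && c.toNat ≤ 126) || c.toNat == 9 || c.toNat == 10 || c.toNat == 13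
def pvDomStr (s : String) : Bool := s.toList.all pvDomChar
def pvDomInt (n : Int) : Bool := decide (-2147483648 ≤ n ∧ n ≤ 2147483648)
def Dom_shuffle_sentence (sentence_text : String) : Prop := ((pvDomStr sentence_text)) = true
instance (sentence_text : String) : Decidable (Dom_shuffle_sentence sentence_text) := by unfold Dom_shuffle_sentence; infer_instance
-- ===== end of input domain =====

-- B replaces A's step-2 index loop (with its i+1 bounds branch) by two strided slices
-- interleaved via zip, appending the unmatched trailing word; objective: more idiomatic.

-- ===== PORT A =====
def shuffle_sentence (sentence_text : String) : String :=
  let words := PySem.Str.split₀ sentence_text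
  let shuffled_words : List String :=
    (PySem.List.pyRange 0 (PySem.List.len words) 2).foldl
      (fun acc i =>
        if i + 1 < PySem.List.len words then
          acc ++ [PySem.List.pyGetD words (i + 1) "", PySem.List.pyGetD words i ""]
        else
          acc ++ [PySem.List.pyGetD words i ""]) []
  PySem.Str.join " " shuffled_words

-- ===== PORT B =====
def shuffle_sentence_alt (sentence_text : String) : String :=
  let words := PySem.Str.split₀ sentence_text
  let evens := (PySem.List.slice? words (some 0) none 2).getD []
  let odds := (PySem.List.slice? words (some 1) none 2).getD []
  let out := (odds.zip evens).flatMap (fun pair => [pair.1, pair.2])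
  let out := if odds.length < evens.length then out ++ [PySem.List.pyGetD evens (-1) ""] else out
  PySem.Str.join " " out

-- ===== PRECONDITION & SPEC =====
def Spec_shuffle_sentence (sentence_text : String) (out : String) : Prop := out = shuffle_sentence_alt sentence_text
instance (sentence_text : String) (out : String) : Decidable (Spec_shuffle_sentence sentence_text out) := by unfold Spec_shuffle_sentence; infer_instance

-- ===== CLAIM (what is proved, stated in full; the proofs are below) =====
def Claim_equal_shuffle_sentence : Prop := ∀ (sentence_text : String), Dom_shuffle_sentence sentence_text → Spec_shuffle_sentence sentence_text (shuffle_sentence sentence_text)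

-- ===== LEMMAS AND PROOFS =====

def evensOf {α : Type} : List α → List α
  | [] => []
  | [x] => [x]
  | x :: _ :: rest => x :: evensOf rest

def oddsOf {α : Type} : List α → List α
  | [] => []
  | [_] => []
  | _ :: y :: rest => y :: oddsOf rest

lemma fm_even {α : Type} (xs : List α) :
    List.filterMap (fun k : Nat => xs[2*k]?) (List.range ((xs.length+1)/2)) = evensOf xs := by
  induction xs using evensOf.induct with
  | case1 => simp [evensOf]
  | case2 x => simp [evensOf]
  | case3 x y rest ih =>
      have hc : ((x :: y :: rest).length + 1) / 2 = (rest.length + 1) / 2 + 1 := by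
        simp; omega
      rw [hc, List.range_succ_eq_map, List.filterMap_cons, List.filterMap_map]
      simp only [Nat.mul_zero, List.getElem?_cons_zero, Function.comp_def]
      have : (fun k : Nat => (x :: y :: rest)[2*(k+1)]?) = fun k : Nat => rest[2*k]? := by
        funext k
        have h2 : 2*(k+1) = 2*k + 1 + 1 := by omega
        rw [h2]
        simp
      rw [this, ih, evensOf]

lemma sliceEvens {α : Type} (xs : List α) :
    PySem.List.slice? xs (some 0) none 2 = some (evensOf xs) := by
  simp only [PySem.List.slice?, PySem.List.sliceIndices]
  norm_num
  have hc : (if 0 < xs.length then (((xs.length:Int) + 2 - 1) / 2).toNat else 0) = (xs.length+1)/2 := by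
    split_ifs <;> omega
  have hf : (fun k : Nat => xs[((2:Int) * ↑k).toNat]?) = fun k : Nat => xs[2*k]? := by
    funext k
    have h2 : ((2:Int) * ↑k).toNat = 2*k := by omega
    rw [h2]
  rw [hc, hf, fm_even]

lemma odds_cons {α : Type} (tl : List α) : ∀ x, oddsOf (x :: tl) = evensOf tl := by
  induction tl using evensOf.induct with
  | case1 => intro x; rfl
  | case2 y => intro x; rfl
  | case3 y z r ih => intro x; simp [oddsOf, evensOf, ih z]

lemma sliceOdds {α : Type} (xs : List α) :
    PySem.List.slice? xs (some 1) none 2 = some (oddsOf xs) := by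
  cases xs with
  | nil => rfl
  | cons x tl =>
      simp only [PySem.List.slice?, PySem.List.sliceIndices]
      norm_num
      have hc : (if 0 < tl.length then (((tl.length:Int) + 2 - 1) / 2).toNat else 0) = (tl.length+1)/2 := by
        split_ifs <;> omega
      have hf : (fun k : Nat => (x :: tl)[((1:Int) + 2 * ↑k).toNat]?) = fun k : Nat => tl[2*k]? := by
        funext k
        have h2 : ((1:Int) + 2 * ↑k).toNat = 2*k + 1 := by omega
        rw [h2]
        simp
      rw [hc, hf, fm_even, odds_cons]

def swapPairs {α : Type} : List α → List α
  | [] => []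
  | [x] => [x]
  | x :: y :: rest => y :: x :: swapPairs rest

lemma pyRange_two_eq_nil {a b : Int} (h : b ≤ a) : PySem.List.pyRange a b 2 = [] := by
  rw [PySem.List.pyRange_of_pos a b (by norm_num)]
  simp [if_neg (by omega : ¬ a < b)]

lemma pyRange_two_cons {a b : Int} (h : a < b) :
    PySem.List.pyRange a b 2 = a :: PySem.List.pyRange (a + 2) b 2 := by
  rw [PySem.List.pyRange_of_pos a b (by norm_num), PySem.List.pyRange_of_pos (a+2) b (by norm_num)]
  rw [if_pos h]
  have hc : ((b - a + 2 - 1) / 2).toNat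
      = (if a + 2 < b then ((b - (a + 2) + 2 - 1) / 2).toNat else 0) + 1 := by
    split_ifs with h2 <;> omega
  rw [hc, List.range_succ_eq_map]
  simp only [List.map_cons, Nat.cast_zero, mul_zero, add_zero, List.map_map, Function.comp_def]
  congr 1
  apply List.map_congr_left
  intro k _
  push_cast
  ring

lemma pyGetD_appendLen (pre ws : List String) (w : String) :
    PySem.List.pyGetD (pre ++ w :: ws) (pre.length : Int) "" = w := by
  simp [PySem.List.pyGetD]

lemma loopA (full : List String) :
    ∀ (ws pre acc : List String), full = pre ++ ws →
    (PySem.List.pyRange (pre.length : Int) (full.length : Int) 2).foldl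
      (fun acc i =>
        if i + 1 < (full.length : Int) then
          acc ++ [PySem.List.pyGetD full (i + 1) "", PySem.List.pyGetD full i ""]
        else
          acc ++ [PySem.List.pyGetD full i ""]) acc
      = acc ++ swapPairs ws := by
  intro ws
  induction ws using swapPairs.induct with
  | case1 =>
      intro pre acc h
      rw [pyRange_two_eq_nil (by simp [h])]
      simp [swapPairs]
  | case2 x =>
      intro pre acc h
      have hlen : full.length = pre.length + 1 := by simp [h]
      rw [pyRange_two_cons (by omega), pyRange_two_eq_nil (by omega)]
      simp only [List.foldl_cons, List.foldl_nil]
      rw [if_neg (by omega)]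
      rw [h, pyGetD_appendLen]
      simp [swapPairs]
  | case3 x y rest ih =>
      intro pre acc h
      have hlen : full.length = pre.length + rest.length + 2 := by simp [h]; omega
      rw [pyRange_two_cons (by omega)]
      simp only [List.foldl_cons]
      rw [if_pos (by omega)]
      have hx : PySem.List.pyGetD full (pre.length : Int) "" = x := by
        rw [h, pyGetD_appendLen]
      have hy : PySem.List.pyGetD full ((pre.length : Int) + 1) "" = y := by
        have h1 : ((pre.length : Int) + 1) = (((pre ++ [x]).length : Nat) : Int) := by simp
        have h2 : full = (pre ++ [x]) ++ y :: rest := by simp [h]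
        rw [h1, h2, pyGetD_appendLen]
      rw [hx, hy]
      have h3 : ((pre.length : Int) + 2) = (((pre ++ [x, y]).length : Nat) : Int) := by
        simp
      rw [h3, ih (pre ++ [x, y]) (acc ++ [y, x]) (by simp [h])]
      simp [swapPairs]

lemma pyGetD_neg_one_cons (x : String) (l : List String) (h : l ≠ []) :
    PySem.List.pyGetD (x :: l) (-1) "" = PySem.List.pyGetD l (-1) "" := by
  rw [PySem.List.pyGetD_neg_one _ _ (by simp), PySem.List.pyGetD_neg_one _ _ h,
    List.getLast_cons h]

lemma interleave_eq (ws : List String) :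
    (if (oddsOf ws).length < (evensOf ws).length then
        ((oddsOf ws).zip (evensOf ws)).flatMap (fun pair => [pair.1, pair.2])
          ++ [PySem.List.pyGetD (evensOf ws) (-1) ""]
      else ((oddsOf ws).zip (evensOf ws)).flatMap (fun pair => [pair.1, pair.2]))
    = swapPairs ws := by
  induction ws using swapPairs.induct with
  | case1 => simp [oddsOf, evensOf, swapPairs]
  | case2 x =>
      simp [oddsOf, evensOf, swapPairs, PySem.List.pyGetD, PySem.List.pyGet?_neg_one]
  | case3 x y rest ih =>
      simp only [oddsOf, evensOf, swapPairs, List.zip_cons_cons, List.flatMap_cons,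
        List.length_cons, add_lt_add_iff_right, List.cons_append, List.nil_append]
      split_ifs with hc
      · have hne : evensOf rest ≠ [] := by
          intro h0
          rw [h0] at hc
          simp at hc
        rw [pyGetD_neg_one_cons _ _ hne]
        rw [if_pos hc] at ih
        rw [← ih]
      · rw [if_neg hc] at ih
        rw [← ih]

-- ===== VERDICT (by name: the statement is the Claim_ definition above) =====
theorem shuffle_sentence_spec : Claim_equal_shuffle_sentence := by
  intro s _
  unfold Spec_shuffle_sentence shuffle_sentence shuffle_sentence_alt
  simp only [PySem.List.len_eq, sliceEvens, sliceOdds, Option.getD_some]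
  have hA := loopA (PySem.Str.split₀ s) (PySem.Str.split₀ s) [] [] (by simp)
  norm_num at hA
  rw [interleave_eq]
  exact congrArg (PySem.Str.join " ") hA
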